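-- pv_equiv track=rewrite | github.com/pypi-data/pypi-mirror-374 | packages/chat-console/chat_console-0.5.95.tar.gz/chat_console-0.5.95/app/model_manager.py | _estimate_max_tokens
-- ===== SOURCE A (Python) =====
-- def _estimate_max_tokens(model_id: str, provider: str) -> int:
--     """Estimate max tokens for a model"""
--     # Convert to lowercase for case-insensitive matching
--     model_id_lower = model_id.lower()
--
--     # These are rough estimates based on known model capabilities
--     if provider == 'openai':
--         # Check most specific patterns first
--         if any(x in model_id_lower for x in ['o1', 'o3', 'o4']):
--             return 128000  # Reasoning models have high context
--         elif 'gpt-4o' in model_id_lower or 'gpt-4-turbo' in model_id_lower: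
--             return 128000  # GPT-4o and GPT-4 Turbo have 128k context
--         elif '32k' in model_id_lower:
--             return 32768
--         elif '16k' in model_id_lower:
--             return 16384
--         elif 'gpt-4' in model_id_lower:
--             return 8192  # Base GPT-4
--         else:
--             return 4096  # Default for GPT-3.5 and others
--     elif provider == 'anthropic':
--         if 'opus' in model_id_lower:
--             return 200000  # Claude 3 Opus has 200k context
--         elif 'sonnet' in model_id_lower or 'haiku' in model_id_lower:
--             return 200000  # Claude 3.5 models have 200k context
--         else:
--             return 100000  # Conservative default
--     elif provider == 'openai-compatible':
--         # Estimates for common custom/Groq models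
--         if 'llama-3' in model_id_lower and '70b' in model_id_lower:
--             return 128000
--         elif 'llama' in model_id_lower:
--             return 32768
--         elif 'mixtral' in model_id_lower:
--             return 32768
--         elif 'qwen' in model_id_lower:
--             return 32768
--         elif 'deepseek' in model_id_lower:
--             return 64000
--         elif 'gemma' in model_id_lower:
--             return 8192
--         else:
--             return 8192  # Conservative default for custom models
--     else:
--         return 4096  # Default fallback
-- ===== SOURCE B (Python) =====
-- # B: one flat rule list (lowest priority first) folded with an overwriting
-- # accumulator: each matching rule overwrites the result, so the last match
-- # (= highest priority) wins.  Disjunctive patterns are flattened into separate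
-- # rules; per-provider defaults are rules with an empty (always-true) pattern list.
-- _FLAT_RULES = [
--     # (provider, patterns all required in lowercased id, value)
--     ('openai', [], 4096),
--     ('openai', ['gpt-4'], 8192),
--     ('openai', ['16k'], 16384),
--     ('openai', ['32k'], 32768),
--     ('openai', ['gpt-4-turbo'], 128000),
--     ('openai', ['gpt-4o'], 128000),
--     ('openai', ['o4'], 128000),
--     ('openai', ['o3'], 128000),
--     ('openai', ['o1'], 128000),
--     ('anthropic', [], 100000),
--     ('anthropic', ['haiku'], 200000),
--     ('anthropic', ['sonnet'], 200000),
--     ('anthropic', ['opus'], 200000),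
--     ('openai-compatible', [], 8192),
--     ('openai-compatible', ['gemma'], 8192),
--     ('openai-compatible', ['deepseek'], 64000),
--     ('openai-compatible', ['qwen'], 32768),
--     ('openai-compatible', ['mixtral'], 32768),
--     ('openai-compatible', ['llama'], 32768),
--     ('openai-compatible', ['llama-3', '70b'], 128000),
-- ]
--
--
-- def _estimate_max_tokens(model_id: str, provider: str) -> int:
--     m = model_id.lower()
--     tokens = 4096  # global fallback for unknown providers
--     for prov, pats, val in _FLAT_RULES:
--         if prov == provider and all(p in m for p in pats):
--             tokens = val
--     return tokens
-- ===== Notes on version B (the rewrite author's own statement) =====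
-- stated objective: alternative
-- what changed: Replaced the per-provider if/elif first-match chains by one flat rule list folded lowest-priority-first with an overwriting accumulator (last match wins); disjunctive patterns are split into separate rules and defaults become always-true rules.
import Mathlib
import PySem

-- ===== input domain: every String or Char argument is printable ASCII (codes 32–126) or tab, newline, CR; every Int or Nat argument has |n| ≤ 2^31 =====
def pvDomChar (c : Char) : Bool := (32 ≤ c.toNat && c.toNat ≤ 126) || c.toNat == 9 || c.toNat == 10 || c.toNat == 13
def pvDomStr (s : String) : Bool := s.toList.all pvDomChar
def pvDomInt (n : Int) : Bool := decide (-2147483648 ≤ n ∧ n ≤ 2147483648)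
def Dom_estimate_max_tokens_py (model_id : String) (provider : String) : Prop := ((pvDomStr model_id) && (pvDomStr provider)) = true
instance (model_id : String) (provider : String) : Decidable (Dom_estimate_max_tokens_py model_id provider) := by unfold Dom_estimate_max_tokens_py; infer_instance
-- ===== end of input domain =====

-- B replaces A's per-provider if/elif first-match chains by one flat rule list folded lowest-priority-first with an overwriting accumulator (alternative decomposition, same cost).


-- ===== PORT A =====
def estimate_max_tokens_py (model_id : String) (provider : String) : Int :=
  let model_id_lower := PySem.Str.lower model_id
  if provider = "openai" then
    if ["o1", "o3", "o4"].any (fun x => PySem.Str.isIn x model_id_lower) then 128000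
    else if PySem.Str.isIn "gpt-4o" model_id_lower || PySem.Str.isIn "gpt-4-turbo" model_id_lower then 128000
    else if PySem.Str.isIn "32k" model_id_lower then 32768
    else if PySem.Str.isIn "16k" model_id_lower then 16384
    else if PySem.Str.isIn "gpt-4" model_id_lower then 8192
    else 4096
  else if provider = "anthropic" then
    if PySem.Str.isIn "opus" model_id_lower then 200000
    else if PySem.Str.isIn "sonnet" model_id_lower || PySem.Str.isIn "haiku" model_id_lower then 200000
    else 100000
  else if provider = "openai-compatible" then
    if PySem.Str.isIn "llama-3" model_id_lower && PySem.Str.isIn "70b" model_id_lower then 128000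
    else if PySem.Str.isIn "llama" model_id_lower then 32768
    else if PySem.Str.isIn "mixtral" model_id_lower then 32768
    else if PySem.Str.isIn "qwen" model_id_lower then 32768
    else if PySem.Str.isIn "deepseek" model_id_lower then 64000
    else if PySem.Str.isIn "gemma" model_id_lower then 8192
    else 8192
  else 4096

-- ===== PORT B =====
-- one flat rule list, lowest priority first; a matching rule overwrites the accumulator
def emtFlatRules : List (String × List String × Int) := [
  ("openai", [], 4096),
  ("openai", ["gpt-4"], 8192),
  ("openai", ["16k"], 16384),
  ("openai", ["32k"], 32768),
  ("openai", ["gpt-4-turbo"], 128000),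
  ("openai", ["gpt-4o"], 128000),
  ("openai", ["o4"], 128000),
  ("openai", ["o3"], 128000),
  ("openai", ["o1"], 128000),
  ("anthropic", [], 100000),
  ("anthropic", ["haiku"], 200000),
  ("anthropic", ["sonnet"], 200000),
  ("anthropic", ["opus"], 200000),
  ("openai-compatible", [], 8192),
  ("openai-compatible", ["gemma"], 8192),
  ("openai-compatible", ["deepseek"], 64000),
  ("openai-compatible", ["qwen"], 32768),
  ("openai-compatible", ["mixtral"], 32768),
  ("openai-compatible", ["llama"], 32768),
  ("openai-compatible", ["llama-3", "70b"], 128000)]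

def estimate_max_tokens_py_alt (model_id : String) (provider : String) : Int :=
  let m := PySem.Str.lower model_id
  emtFlatRules.foldl
    (fun tokens r =>
      if r.1 == provider && r.2.1.all (fun p => PySem.Str.isIn p m) then r.2.2 else tokens)
    4096

-- ===== PRECONDITION & SPEC =====
def Spec_estimate_max_tokens_py (model_id : String) (provider : String) (out : Int) : Prop := out = estimate_max_tokens_py_alt model_id provider
instance (model_id : String) (provider : String) (out : Int) : Decidable (Spec_estimate_max_tokens_py model_id provider out) := by unfold Spec_estimate_max_tokens_py; infer_instance

-- ===== CLAIM (what is proved, stated in full; the proofs are below) =====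
def Claim_equal_estimate_max_tokens_py : Prop := ∀ (model_id : String) (provider : String), Dom_estimate_max_tokens_py model_id provider → Spec_estimate_max_tokens_py model_id provider (estimate_max_tokens_py model_id provider)

-- ===== LEMMAS AND PROOFS =====

-- ===== VERDICT (by name: the statement is the Claim_ definition above) =====
theorem estimate_max_tokens_py_spec : Claim_equal_estimate_max_tokens_py := by
  intro model_id provider _
  unfold Spec_estimate_max_tokens_py estimate_max_tokens_py estimate_max_tokens_py_alt emtFlatRules
  by_cases h1 : provider = "openai"
  · subst h1
    rcases Bool.eq_false_or_eq_true (PySem.Chars.isIn ['o', '1'] (PySem.Chars.lower model_id.toList)) with b1 | b1 <;>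
    rcases Bool.eq_false_or_eq_true (PySem.Chars.isIn ['o', '3'] (PySem.Chars.lower model_id.toList)) with b2 | b2 <;>
    rcases Bool.eq_false_or_eq_true (PySem.Chars.isIn ['o', '4'] (PySem.Chars.lower model_id.toList)) with b3 | b3 <;>
    rcases Bool.eq_false_or_eq_true (PySem.Chars.isIn ['g', 'p', 't', '-', '4', 'o'] (PySem.Chars.lower model_id.toList)) with b4 | b4 <;>
    rcases Bool.eq_false_or_eq_true (PySem.Chars.isIn ['g', 'p', 't', '-', '4', '-', 't', 'u', 'r', 'b', 'o'] (PySem.Chars.lower model_id.toList)) with b5 | b5 <;>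
    rcases Bool.eq_false_or_eq_true (PySem.Chars.isIn ['3', '2', 'k'] (PySem.Chars.lower model_id.toList)) with b6 | b6 <;>
    rcases Bool.eq_false_or_eq_true (PySem.Chars.isIn ['1', '6', 'k'] (PySem.Chars.lower model_id.toList)) with b7 | b7 <;>
    rcases Bool.eq_false_or_eq_true (PySem.Chars.isIn ['g', 'p', 't', '-', '4'] (PySem.Chars.lower model_id.toList)) with b8 | b8 <;>
      simp [List.foldl, b1, b2, b3, b4, b5, b6, b7, b8]
  · by_cases h2 : provider = "anthropic"
    · subst h2
      have hn : ("openai" == "anthropic") = false := by decide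
      rcases Bool.eq_false_or_eq_true (PySem.Chars.isIn ['o', 'p', 'u', 's'] (PySem.Chars.lower model_id.toList)) with ho | ho <;>
      rcases Bool.eq_false_or_eq_true (PySem.Chars.isIn ['s', 'o', 'n', 'n', 'e', 't'] (PySem.Chars.lower model_id.toList)) with hs | hs <;>
      rcases Bool.eq_false_or_eq_true (PySem.Chars.isIn ['h', 'a', 'i', 'k', 'u'] (PySem.Chars.lower model_id.toList)) with hh | hh <;>
        simp [List.foldl, ho, hs, hh]
    · by_cases h3 : provider = "openai-compatible"
      · subst h3
        rcases Bool.eq_false_or_eq_true (PySem.Chars.isIn ['l', 'l', 'a', 'm', 'a', '-', '3'] (PySem.Chars.lower model_id.toList)) with c1 | c1 <;>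
        rcases Bool.eq_false_or_eq_true (PySem.Chars.isIn ['7', '0', 'b'] (PySem.Chars.lower model_id.toList)) with c2 | c2 <;>
        rcases Bool.eq_false_or_eq_true (PySem.Chars.isIn ['l', 'l', 'a', 'm', 'a'] (PySem.Chars.lower model_id.toList)) with c3 | c3 <;>
        rcases Bool.eq_false_or_eq_true (PySem.Chars.isIn ['m', 'i', 'x', 't', 'r', 'a', 'l'] (PySem.Chars.lower model_id.toList)) with c4 | c4 <;>
        rcases Bool.eq_false_or_eq_true (PySem.Chars.isIn ['q', 'w', 'e', 'n'] (PySem.Chars.lower model_id.toList)) with c5 | c5 <;>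
        rcases Bool.eq_false_or_eq_true (PySem.Chars.isIn ['d', 'e', 'e', 'p', 's', 'e', 'e', 'k'] (PySem.Chars.lower model_id.toList)) with c6 | c6 <;>
        rcases Bool.eq_false_or_eq_true (PySem.Chars.isIn ['g', 'e', 'm', 'm', 'a'] (PySem.Chars.lower model_id.toList)) with c7 | c7 <;>
          simp [List.foldl, c1, c2, c3, c4, c5, c6, c7]
      · have hb1 : ("openai" == provider) = false := by simp [Ne.symm h1]
        have hb2 : ("anthropic" == provider) = false := by simp [Ne.symm h2]
        have hb3 : ("openai-compatible" == provider) = false := by simp [Ne.symm h3]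
        simp [List.foldl, h1, h2, h3, hb1, hb2, hb3]
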